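-- pv_equiv track=rewrite | github.com/terencefan/inority-workspace | skills/runbook/scripts/commands/normalize.py | extract_h3_blocks
-- ===== SOURCE A (Python) =====
-- def parse_sections(lines: list[str], level: int) -> list[tuple[int, str]]:
--     prefix = "#" * level + " "
--     return [
--         (idx, line[len(prefix) :].strip())
--         for idx, line in enumerate(lines)
--         if line.startswith(prefix)
--     ]
--
-- def extract_h3_blocks(
--     lines: list[str], start: int, end: int
-- ) -> list[tuple[int, str, int, int]]:
--     local_h3 = parse_sections(lines[start:end], 3)
--     blocks: list[tuple[int, str, int, int]] = []
--     for i, (local_start, title) in enumerate(local_h3):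
--         abs_start = start + local_start
--         abs_end = start + local_h3[i + 1][0] if i + 1 < len(local_h3) else end
--         blocks.append((abs_start, title, abs_start, abs_end))
--     return blocks
-- ===== SOURCE B (Python) =====
-- def extract_h3_blocks(lines, start, end):
--     blocks = []
--     pending = None  # (abs_start, title) of the H3 block not yet closed
--     for i, line in enumerate(lines[start:end]):
--         if line.startswith("### "):
--             if pending is not None:
--                 s, t = pending
--                 blocks.append((s, t, s, start + i))
--             pending = (start + i, line[4:].strip())
--     if pending is not None:
--         s, t = pending
--         blocks.append((s, t, s, end))
--     return blocks
-- ===== Notes on version B (the rewrite author's own statement) =====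
-- stated objective: simpler
-- what changed: A first materialises the full list of H3 headings and then, for each, indexes its successor to find the block end; B makes a single pass over the sliced lines keeping one pending block and closing it at the next heading (or at end).
import Mathlib
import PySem

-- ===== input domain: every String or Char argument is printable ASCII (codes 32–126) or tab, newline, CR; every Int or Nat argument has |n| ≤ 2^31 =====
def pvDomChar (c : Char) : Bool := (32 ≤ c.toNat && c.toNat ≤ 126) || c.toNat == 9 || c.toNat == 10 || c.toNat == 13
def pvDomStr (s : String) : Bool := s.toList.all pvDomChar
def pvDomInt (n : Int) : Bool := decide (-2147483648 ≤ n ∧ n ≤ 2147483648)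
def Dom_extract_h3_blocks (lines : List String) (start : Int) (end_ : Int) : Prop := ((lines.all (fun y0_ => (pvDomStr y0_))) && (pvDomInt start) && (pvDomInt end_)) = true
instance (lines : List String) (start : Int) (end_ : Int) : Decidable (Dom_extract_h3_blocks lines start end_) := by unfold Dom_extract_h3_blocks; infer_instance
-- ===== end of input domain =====

-- B replaces A's two-pass "collect headings, then index each heading's successor" with a
-- single pass that keeps one pending block and closes it at the next heading (objective: simpler).

-- ===== PORT A =====
def parse_sections (lines : List String) (level : Int) : List (Int × String) :=
  let pfx : List Char := PySem.List.pyRepeat ['#'] level ++ [' ']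
  (PySem.List.enumerate lines 0).filterMap (fun p =>
    if PySem.Chars.startswith p.2.toList pfx then
      some (p.1, String.ofList (PySem.Chars.strip (PySem.Chars.slice p.2.toList (some (pfx.length : Int)) none)))
    else none)

def extract_h3_blocks (lines : List String) (start : Int) (end_ : Int) : List (Int × String × Int × Int) :=
  let local_h3 := parse_sections (PySem.List.slice lines (some start) (some end_)) 3
  (PySem.List.enumerate local_h3 0).foldl (fun blocks p =>
    let abs_start := start + p.2.1
    let abs_end := if p.1 + 1 < (local_h3.length : Int)
      then start + (PySem.List.pyGetD local_h3 (p.1 + 1) (0, "")).1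
      else end_
    blocks ++ [(abs_start, p.2.2, abs_start, abs_end)]) []

-- ===== PORT B =====
def extract_h3_blocks_alt (lines : List String) (start : Int) (end_ : Int) : List (Int × String × Int × Int) :=
  let r := (PySem.List.enumerate (PySem.List.slice lines (some start) (some end_)) 0).foldl
    (fun st p =>
      if PySem.Chars.startswith p.2.toList ['#', '#', '#', ' '] then
        (match st.2 with
          | some (s, t) => st.1 ++ [(s, t, s, start + p.1)]
          | none => st.1,
         some (start + p.1, String.ofList (PySem.Chars.strip (PySem.Chars.slice p.2.toList (some 4) none))))
      else st)
    ([], none)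
  match r.2 with
  | some (s, t) => r.1 ++ [(s, t, s, end_)]
  | none => r.1

-- ===== PRECONDITION & SPEC =====
def Spec_extract_h3_blocks (lines : List String) (start : Int) (end_ : Int) (out : List (Int × String × Int × Int)) : Prop := out = extract_h3_blocks_alt lines start end_
instance (lines : List String) (start : Int) (end_ : Int) (out : List (Int × String × Int × Int)) : Decidable (Spec_extract_h3_blocks lines start end_ out) := by unfold Spec_extract_h3_blocks; infer_instance

-- ===== CLAIM (what is proved, stated in full; the proofs are below) =====
def Claim_equal_extract_h3_blocks : Prop := ∀ (lines : List String) (start : Int) (end_ : Int), Dom_extract_h3_blocks lines start end_ → Spec_extract_h3_blocks lines start end_ (extract_h3_blocks lines start end_)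

-- ===== LEMMAS AND PROOFS =====

-- the heading extractor both ports share, in B's literal form
def pvHead (p : Int × String) : Option (Int × String) :=
  if PySem.Chars.startswith p.2.toList ['#', '#', '#', ' '] then
    some (p.1, String.ofList (PySem.Chars.strip (PySem.Chars.slice p.2.toList (some 4) none)))
  else none

lemma parse_sections_three (ls : List String) :
    parse_sections ls 3 = (PySem.List.enumerate ls 0).filterMap pvHead := by
  simp [parse_sections, pvHead, PySem.List.pyRepeat]

-- direct recursive description of A's loop over the heading list
def pvHeadEnd (start end_ : Int) : List (Int × String) → Int
  | [] => end_
  | (j, _) :: _ => start + j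

def pvMkA (start end_ : Int) : List (Int × String) → List (Int × String × Int × Int)
  | [] => []
  | (i, t) :: rest => (start + i, t, start + i, pvHeadEnd start end_ rest) :: pvMkA start end_ rest

-- unclosed-block bookkeeping of B's loop
def pvGlue (start end_ : Int) : Option (Int × String) → List (Int × String) → List (Int × String × Int × Int)
  | none, [] => []
  | some (s, u), [] => [(s, u, s, end_)]
  | none, (i, t) :: rest => pvGlue start end_ (some (start + i, t)) rest
  | some (s, u), (i, t) :: rest => (s, u, s, start + i) :: pvGlue start end_ (some (start + i, t)) rest

lemma pvGlue_some (start end_ : Int) (l : List (Int × String)) (s : Int) (u : String) :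
    pvGlue start end_ (some (s, u)) l = (s, u, s, pvHeadEnd start end_ l) :: pvMkA start end_ l := by
  induction l generalizing s u with
  | nil => rfl
  | cons p rest ih =>
    obtain ⟨i, t⟩ := p
    simp [pvGlue, pvMkA, pvHeadEnd, ih]

lemma pvGlue_none_eq_mkA (start end_ : Int) (l : List (Int × String)) :
    pvGlue start end_ none l = pvMkA start end_ l := by
  cases l with
  | nil => rfl
  | cons p rest =>
    obtain ⟨i, t⟩ := p
    simp [pvGlue, pvMkA, pvGlue_some]

-- A's fold (with successor lookup into hs) computes pvMkA of the suffix it still has to visit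
lemma loopA (start end_ : Int) (hs : List (Int × String)) :
    ∀ (t : List (Int × String)) (k : Nat), hs.drop k = t → ∀ acc,
      (PySem.List.enumerate t (k : Int)).foldl (fun blocks p =>
        blocks ++ [(start + p.2.1, p.2.2, start + p.2.1,
          if p.1 + 1 < (hs.length : Int)
          then start + (PySem.List.pyGetD hs (p.1 + 1) (0, "")).1
          else end_)]) acc = acc ++ pvMkA start end_ t := by
  intro t
  induction t with
  | nil => intro k _ acc; simp [PySem.List.enumerate_nil, pvMkA]
  | cons p rest ih =>
    intro k hk acc
    obtain ⟨i, x⟩ := p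
    have hrest : hs.drop (k + 1) = rest := by
      have := congrArg List.tail hk
      simpa [List.tail_drop] using this
    have hklen : k < hs.length := by
      by_contra h
      rw [List.drop_eq_nil_of_le (by omega)] at hk
      exact (List.cons_ne_nil _ _) hk.symm
    have hnext : (if (k : Int) + 1 < (hs.length : Int)
        then start + (PySem.List.pyGetD hs ((k : Int) + 1) (0, "")).1
        else end_) = pvHeadEnd start end_ rest := by
      cases rest with
      | nil =>
        have hlen : hs.length ≤ k + 1 := by
          by_contra h
          have hne : hs.drop (k + 1) ≠ [] := by
            simp [List.drop_eq_nil_iff]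
            omega
          exact hne hrest
        rw [if_neg (by exact_mod_cast (by omega : ¬ k + 1 < hs.length))]
        rfl
      | cons q rest' =>
        have hlen : k + 1 < hs.length := by
          by_contra h
          rw [List.drop_eq_nil_of_le (by omega)] at hrest
          exact (List.cons_ne_nil _ _) hrest.symm
        have hget : hs.getD (k + 1) (0, "") = q := by
          have hq : hs[k+1]? = some q := by
            have h0 : (List.drop (k + 1) hs)[0]? = some q := by rw [hrest]; rfl
            rw [List.getElem?_drop] at h0
            simpa using h0
          simp [List.getD, hq]
        rw [if_pos (by exact_mod_cast hlen)]
        have : PySem.List.pyGetD hs ((k : Int) + 1) (0, "") = q := by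
          have hc : ((k : Int) + 1) = ((k + 1 : Nat) : Int) := by push_cast; ring
          rw [hc, PySem.List.pyGetD_natCast, hget]
        obtain ⟨j, u⟩ := q
        simp [this, pvHeadEnd]
    rw [PySem.List.enumerate_cons]
    simp only [List.foldl_cons]
    rw [show ((k : Int) + 1) = ((k + 1 : Nat) : Int) by push_cast; ring]
    rw [ih (k + 1) hrest]
    simp [pvMkA, hnext, List.append_assoc]

-- B's fold followed by closing the pending block computes pvGlue
lemma loopB (start end_ : Int) :
    ∀ (t : List (Int × String)) (acc : List (Int × String × Int × Int)) (p : Option (Int × String)),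
      (match (t.foldl (fun st (q : Int × String) =>
          ((match st.2 with
            | some (s, u) => st.1 ++ [(s, u, s, start + q.1)]
            | none => st.1),
           some (start + q.1, q.2))) (acc, p)).2 with
        | some (s, u) => (t.foldl (fun st (q : Int × String) =>
            ((match st.2 with
              | some (s, u) => st.1 ++ [(s, u, s, start + q.1)]
              | none => st.1),
             some (start + q.1, q.2))) (acc, p)).1 ++ [(s, u, s, end_)]
        | none => (t.foldl (fun st (q : Int × String) =>
            ((match st.2 with
              | some (s, u) => st.1 ++ [(s, u, s, start + q.1)]
              | none => st.1),
             some (start + q.1, q.2))) (acc, p)).1)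
      = acc ++ pvGlue start end_ p t := by
  intro t
  induction t with
  | nil =>
    intro acc p
    cases p with
    | none => simp [pvGlue]
    | some su => obtain ⟨s, u⟩ := su; simp [pvGlue]
  | cons q rest ih =>
    intro acc p
    obtain ⟨i, x⟩ := q
    cases p with
    | none =>
      simp only [List.foldl_cons]
      rw [show ((match (none : Option (Int × String)) with
            | some (s, u) => acc ++ [(s, u, s, start + i)]
            | none => acc), some (start + i, x)) = ((acc, some (start + i, x)) : List (Int × String × Int × Int) × Option (Int × String)) from rfl]
      rw [ih acc (some (start + i, x))]
      simp [pvGlue]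
    | some su =>
      obtain ⟨s, u⟩ := su
      simp only [List.foldl_cons]
      rw [show ((match (some (s, u) : Option (Int × String)) with
            | some (s, u) => acc ++ [(s, u, s, start + i)]
            | none => acc), some (start + i, x)) = ((acc ++ [(s, u, s, start + i)], some (start + i, x)) : List (Int × String × Int × Int) × Option (Int × String)) from rfl]
      rw [ih (acc ++ [(s, u, s, start + i)]) (some (start + i, x))]
      simp [pvGlue, List.append_assoc]

-- B's step over a raw line factors through pvHead (non-headings are skipped)
lemma foldl_filterMap_pvHead (start : Int)
    (t : List (Int × String)) :
    ∀ (st : List (Int × String × Int × Int) × Option (Int × String)),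
      t.foldl (fun st p =>
        if PySem.Chars.startswith p.2.toList ['#', '#', '#', ' '] then
          ((match st.2 with
            | some (s, u) => st.1 ++ [(s, u, s, start + p.1)]
            | none => st.1),
           some (start + p.1, String.ofList (PySem.Chars.strip (PySem.Chars.slice p.2.toList (some 4) none))))
        else st) st
      = (t.filterMap pvHead).foldl (fun st (q : Int × String) =>
          ((match st.2 with
            | some (s, u) => st.1 ++ [(s, u, s, start + q.1)]
            | none => st.1),
           some (start + q.1, q.2))) st := by
  induction t with
  | nil => intro st; rfl
  | cons p rest ih =>
    intro st
    by_cases h : PySem.Chars.startswith p.2.toList ['#', '#', '#', ' '] = true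
    · have hp : pvHead p = some (p.1, String.ofList (PySem.Chars.strip (PySem.Chars.slice p.2.toList (some 4) none))) := by
        show (if PySem.Chars.startswith p.2.toList ['#', '#', '#', ' '] then _ else none) = _
        rw [if_pos h]
      rw [List.foldl_cons, if_pos h, List.filterMap_cons, hp, List.foldl_cons]
      exact ih _
    · have hp : pvHead p = none := by
        show (if PySem.Chars.startswith p.2.toList ['#', '#', '#', ' '] then _ else none) = _
        rw [if_neg h]
      rw [List.foldl_cons, if_neg h, List.filterMap_cons, hp]
      exact ih st

-- ===== VERDICT (by name: the statement is the Claim_ definition above) =====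
theorem extract_h3_blocks_spec : Claim_equal_extract_h3_blocks := by
  intro lines start end_ _
  unfold Spec_extract_h3_blocks
  simp only [extract_h3_blocks, extract_h3_blocks_alt, parse_sections_three]
  set seg := PySem.List.slice lines (some start) (some end_) with hseg
  have hA := loopA start end_ ((PySem.List.enumerate seg 0).filterMap pvHead)
        ((PySem.List.enumerate seg 0).filterMap pvHead) 0 rfl []
  simp only [Nat.cast_zero] at hA
  rw [hA]
  rw [foldl_filterMap_pvHead start (PySem.List.enumerate seg 0) ([], none)]
  rw [loopB start end_ ((PySem.List.enumerate seg 0).filterMap pvHead) [] none]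
  simp [pvGlue_none_eq_mkA]
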